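-- pv_equiv track=rewrite | github.com/market-predictions/weekly-etf | tools/validate_etf_delivery_html_contract.py | _section_between_title_groups
-- ===== SOURCE A (Python) =====
-- def _find_any(html: str, options: list[str], start: int = 0) -> tuple[int, str | None]:
--     candidates = [(html.find(option, start), option) for option in options]
--     candidates = [(idx, option) for idx, option in candidates if idx != -1]
--     return min(candidates, key=lambda item: item[0]) if candidates else (-1, None)
--
-- def _section_between_title_groups(html: str, start_titles: list[str], end_title_groups: list[list[str]]) -> str:
--     start, found = _find_any(html, start_titles)
--     if start == -1:
--         raise RuntimeError(f"Delivery HTML contract validation failed: missing section title from: {start_titles}")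
--     candidates: list[int] = []
--     for group in end_title_groups:
--         idx, _ = _find_any(html, group, start + len(found or ""))
--         if idx != -1:
--             candidates.append(idx)
--     end = min(candidates) if candidates else len(html)
--     return html[start:end]
-- ===== SOURCE B (Python) =====
-- def _section_between_title_groups(html: str, start_titles: list[str], end_title_groups: list[list[str]]) -> str:
--     # Single left-to-right position scan instead of per-title find() + min().
--     n = len(html)
--     start = next((i for i in range(n + 1)
--                   if any(html.startswith(t, i) for t in start_titles)), None)
--     if start is None:
--         raise RuntimeError(f"Delivery HTML contract validation failed: missing section title from: {start_titles}")
--     found = next(t for t in start_titles if html.startswith(t, start))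
--     end_titles = [t for group in end_title_groups for t in group]
--     pos = start + len(found)
--     end = next((j for j in range(pos, n + 1)
--                 if any(html.startswith(t, j) for t in end_titles)), n)
--     return html[start:end]
-- ===== Notes on version B (the rewrite author's own statement) =====
-- stated objective: faster
-- what changed: A calls str.find once per title (scanning the whole string each time) and takes the min of the hit indices, per end-group and then over groups; B does one left-to-right position scan that stops at the first position where any start title (resp. any flattened end title) matches as a prefix.
import Mathlib
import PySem

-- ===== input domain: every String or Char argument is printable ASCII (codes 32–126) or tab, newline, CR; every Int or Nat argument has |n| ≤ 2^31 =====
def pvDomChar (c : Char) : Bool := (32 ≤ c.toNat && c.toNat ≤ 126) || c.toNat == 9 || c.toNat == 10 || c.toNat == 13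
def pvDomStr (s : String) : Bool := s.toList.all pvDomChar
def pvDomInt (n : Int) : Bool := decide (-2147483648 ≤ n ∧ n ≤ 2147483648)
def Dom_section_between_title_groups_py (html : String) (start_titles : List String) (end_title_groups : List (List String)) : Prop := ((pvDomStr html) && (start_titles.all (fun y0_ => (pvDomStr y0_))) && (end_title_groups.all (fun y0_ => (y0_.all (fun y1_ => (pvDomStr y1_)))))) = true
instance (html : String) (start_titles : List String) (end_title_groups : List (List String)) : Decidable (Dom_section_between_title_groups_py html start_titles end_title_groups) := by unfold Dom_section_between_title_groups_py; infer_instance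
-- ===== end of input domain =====

-- B replaces A's per-title find()+min() selection (each find scans the whole string) by a
-- single left-to-right position scan that stops at the first position where any marker
-- matches (measured faster in a timing run); equivalence of return values is proved
-- on Pre_ (some start title occurs), where Python A returns instead of raising.

-- ===== PORT A =====
-- _find_any(html, options, start): candidates = [(html.find(o, start), o)], filtered, min by index
def findAnyA (html : String) (options : List String) (start : Int) : Int × Option String :=
  let candidates := options.map (fun option => (PySem.Str.findFrom html option start none, option))
  let candidates := candidates.filter (fun p => p.1 ≠ -1)
  match PySem.List.min? candidates (fun item => item.1) with
  | some m => (m.1, some m.2)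
  | none => (-1, none)

def section_between_title_groups_py (html : String) (start_titles : List String) (end_title_groups : List (List String)) : String :=
  let r := findAnyA html start_titles 0
  if r.1 = -1 then ""  -- Python raises RuntimeError here (excluded by Pre_)
  else
    let candidates := end_title_groups.foldl (fun acc group =>
      let r2 := findAnyA html group (r.1 + PySem.Str.len (r.2.getD ""))
      if r2.1 ≠ -1 then acc ++ [r2.1] else acc) ([] : List Int)
    let e := match PySem.List.min? candidates (fun x => x) with
      | some m => m
      | none => PySem.Str.len html
    PySem.Str.slice html (some r.1) (some e)

-- ===== PORT B =====
def section_between_title_groups_py_alt (html : String) (start_titles : List String) (end_title_groups : List (List String)) : String :=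
  let cs := html.toList
  let n := cs.length
  -- html.startswith(t, i): exact for the positions 0 ≤ i ≤ n used below
  let startsw := fun (i : Nat) (t : String) => PySem.Chars.startswith (cs.drop i) t.toList
  match (List.range (n + 1)).find? (fun i => start_titles.any (fun t => startsw i t)) with
  | none => ""  -- Python raises RuntimeError here (excluded by Pre_)
  | some start =>
    let found := (start_titles.find? (fun t => startsw start t)).getD ""
    let endTitles := end_title_groups.flatMap (fun group => group)
    let pos := start + found.toList.length
    let e := ((List.range' pos (n + 1 - pos)).find?
                (fun j => endTitles.any (fun t => startsw j t))).getD n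
    PySem.Str.slice html (some (start : Int)) (some (e : Int))

-- ===== PRECONDITION & SPEC =====
-- Pre_ excludes exactly the inputs where no start title occurs in html: there Python A
-- raises RuntimeError (and B raises the same error).
def Pre_section_between_title_groups_py (html : String) (start_titles : List String) (end_title_groups : List (List String)) : Prop :=
  start_titles.any (fun t => PySem.Str.isIn t html) = true
instance (html : String) (start_titles : List String) (end_title_groups : List (List String)) : Decidable (Pre_section_between_title_groups_py html start_titles end_title_groups) := by unfold Pre_section_between_title_groups_py; infer_instance

def pvWitness_section_between_title_groups_py : String × List String × List (List String) :=
  ("<h1>Top</h1>body<h2>End</h2>", ["<h1>Top</h1>", "<h1>Alt</h1>"], [["<h2>End</h2>"], ["<h2>Other</h2>"]])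

def Spec_section_between_title_groups_py (html : String) (start_titles : List String) (end_title_groups : List (List String)) (out : String) : Prop := out = section_between_title_groups_py_alt html start_titles end_title_groups
instance (html : String) (start_titles : List String) (end_title_groups : List (List String)) (out : String) : Decidable (Spec_section_between_title_groups_py html start_titles end_title_groups out) := by unfold Spec_section_between_title_groups_py; infer_instance

-- ===== CLAIM (what is proved, stated in full; the proofs are below) =====
def Claim_equal_section_between_title_groups_py : Prop := ∀ (html : String) (start_titles : List String) (end_title_groups : List (List String)), Dom_section_between_title_groups_py html start_titles end_title_groups → Pre_section_between_title_groups_py html start_titles end_title_groups → Spec_section_between_title_groups_py html start_titles end_title_groups (section_between_title_groups_py html start_titles end_title_groups)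

-- ===== LEMMAS AND PROOFS =====

-- find? over range' s len finds the least position satisfying p
theorem pv_find?_range'_some {p : Nat → Bool} {s len j : Nat}
    (h : (List.range' s len).find? p = some j) :
    p j = true ∧ s ≤ j ∧ j < s + len ∧ ∀ i, s ≤ i → i < j → p i = false := by
  induction len generalizing s with
  | zero => simp at h
  | succ m ih =>
    rw [List.range'_succ] at h
    by_cases hs : p s = true
    · simp [hs] at h
      subst h
      exact ⟨hs, le_refl _, by omega, fun i h1 h2 => absurd h2 (by omega)⟩
    · simp only [Bool.not_eq_true] at hs
      rw [List.find?_cons_of_neg (by simp [hs])] at h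
      obtain ⟨h1, h2, h3, h4⟩ := ih h
      refine ⟨h1, by omega, by omega, fun i hi1 hi2 => ?_⟩
      rcases Nat.eq_or_lt_of_le hi1 with rfl | hlt
      · exact hs
      · exact h4 i hlt hi2

-- the strict-< running-min fold (PySem.List.min?) keeps the FIRST element whose key equals
-- the lower bound i
theorem pv_minfold_keep {α : Type} (key : α → Int) (i : Int) (m : α) (rest : List α)
    (hlb : ∀ x ∈ rest, i ≤ key x) (hm : key m = i) :
    rest.foldl (fun acc x => match acc with
      | none => some x
      | some m => if key x < key m then some x else some m) (some m) = some m := by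
  induction rest with
  | nil => rfl
  | cons y t ih =>
    have hy : i ≤ key y := hlb y (by simp)
    simp only [List.foldl_cons]
    rw [if_neg (by omega)]
    exact ih (fun x hx => hlb x (by simp [hx]))

theorem pv_minfold_find {α : Type} (key : α → Int) (i : Int) (q : α) (rest : List α)
    (hlb : ∀ x ∈ rest, i ≤ key x) (hq : rest.find? (fun x => key x == i) = some q) :
    ∀ m : α, i < key m →
    rest.foldl (fun acc x => match acc with
      | none => some x
      | some m => if key x < key m then some x else some m) (some m) = some q := by
  induction rest with
  | nil => simp at hq
  | cons y t ih =>
    intro m hm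
    have hy : i ≤ key y := hlb y (by simp)
    by_cases hyi : key y = i
    · rw [List.find?_cons_of_pos (by simp [hyi])] at hq
      obtain rfl : y = q := by injection hq
      simp only [List.foldl_cons]
      rw [if_pos (by omega)]
      exact pv_minfold_keep key i y t (fun x hx => hlb x (by simp [hx])) hyi
    · rw [List.find?_cons_of_neg (by simp [hyi])] at hq
      simp only [List.foldl_cons]
      split
      · exact ih (fun x hx => hlb x (by simp [hx])) hq y (by omega)
      · exact ih (fun x hx => hlb x (by simp [hx])) hq m hm

theorem pv_min?_eq_find? {α : Type} (key : α → Int) (i : Int) (xs : List α)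
    (hlb : ∀ x ∈ xs, i ≤ key x) (hex : (xs.find? (fun x => key x == i)).isSome) :
    PySem.List.min? xs key = xs.find? (fun x => key x == i) := by
  cases xs with
  | nil => simp at hex
  | cons x rest =>
    have hx : i ≤ key x := hlb x (by simp)
    unfold PySem.List.min?
    simp only [List.foldl_cons]
    by_cases hxi : key x = i
    · rw [List.find?_cons_of_pos (by simp [hxi])]
      exact pv_minfold_keep key i x rest (fun z hz => hlb z (by simp [hz])) hxi
    · rw [List.find?_cons_of_neg (by simp [hxi])]
      rw [List.find?_cons_of_neg (by simp [hxi])] at hex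
      obtain ⟨q, hq⟩ := Option.isSome_iff_exists.mp hex
      rw [hq]
      exact pv_minfold_find key i q rest (fun z hz => hlb z (by simp [hz])) hq x (by omega)

-- characterisation of findAnyA at a natural start position pos ≤ len, via the position scan

-- a prefix at position j ≥ pos is an infix of drop pos
theorem pv_prefix_drop_infix (cs t : List Char) (pos j : Nat) (hpj : pos ≤ j)
    (h : t <+: cs.drop j) : t <:+: cs.drop pos := by
  have : t <+: (cs.drop pos).drop (j - pos) := by
    rw [List.drop_drop, Nat.add_sub_cancel' hpj]; exact h
  exact (PySem.Chars.isIn_iff_infix _ _).mp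
    ((PySem.Chars.exists_prefix_drop_iff_isIn _ _).mp ⟨j - pos, this⟩)

theorem pv_findAnyA_none (html : String) (ts : List String) (pos : Nat)
    (hpos : pos ≤ html.toList.length)
    (h : (List.range' pos (html.toList.length + 1 - pos)).find?
          (fun j => ts.any (fun t => PySem.Chars.startswith (html.toList.drop j) t.toList)) = none) :
    findAnyA html ts (pos : Int) = (-1, none) := by
  have hnone := List.find?_eq_none.mp h
  have hall : ∀ t ∈ ts, PySem.Chars.findFrom html.toList t.toList (pos : Int) none = -1 := by
    intro t ht
    rw [PySem.Chars.findFrom_natCast_eq_neg_one_iff html.toList t.toList pos hpos]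
    intro hinf
    obtain ⟨k, hk⟩ := (PySem.Chars.exists_prefix_drop_iff_isIn t.toList _).mpr
      ((PySem.Chars.isIn_iff_infix _ _).mpr hinf)
    rw [List.drop_drop] at hk
    by_cases hkn : pos + k ≤ html.toList.length
    · have hmem : (pos + k) ∈ List.range' pos (html.toList.length + 1 - pos) := by
        rw [List.mem_range'_1]; omega
      have h2 := hnone _ hmem
      simp only [Bool.not_eq_true, List.any_eq_false] at h2
      have h3 := h2 t ht
      rw [(PySem.Chars.startswith_iff _ _).mpr hk] at h3
      simp at h3
    · have htnil : t.toList = [] := by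
        rw [List.drop_eq_nil_of_le (by omega)] at hk
        exact List.prefix_nil.mp hk
      have hmem : pos ∈ List.range' pos (html.toList.length + 1 - pos) := by
        rw [List.mem_range'_1]; omega
      have h2 := hnone _ hmem
      simp only [Bool.not_eq_true, List.any_eq_false] at h2
      have h3 := h2 t ht
      rw [(PySem.Chars.startswith_iff (html.toList.drop pos) t.toList).mpr
        (by rw [htnil]; exact List.nil_prefix)] at h3
      simp at h3
  simp only [findAnyA]
  rw [List.filter_eq_nil_iff.mpr (by
    intro a ha
    obtain ⟨t, ht, rfl⟩ := List.mem_map.mp ha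
    simp [hall t ht])]
  rfl

-- candidate-list shape: find the key ↑j among the filtered (find-result, title) pairs
theorem pv_cands_find (html : String) (pos : Nat) (j : Nat) (ts : List String)
    (hiff : ∀ t ∈ ts, (PySem.Chars.startswith (html.toList.drop j) t.toList = true ↔
        PySem.Str.findFrom html t (pos : Int) none = (j : Int))) :
    ((ts.map (fun option => (PySem.Str.findFrom html option (pos : Int) none, option))).filter
        (fun p => p.1 ≠ -1)).find? (fun x => x.1 == (j : Int))
      = (ts.find? (fun t => PySem.Chars.startswith (html.toList.drop j) t.toList)).map
          (fun t => ((j : Int), t)) := by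
  induction ts with
  | nil => rfl
  | cons t rest ih =>
    have hifft := hiff t (by simp)
    have ihr := ih (fun x hx => hiff x (by simp [hx]))
    by_cases hq : PySem.Chars.startswith (html.toList.drop j) t.toList = true
    · have hF : PySem.Str.findFrom html t (pos : Int) none = (j : Int) := hifft.mp hq
      have hFne : PySem.Str.findFrom html t (pos : Int) none ≠ -1 := by
        rw [hF]; omega
      simp only [List.map_cons]
      rw [List.filter_cons_of_pos (by simpa using hFne)]
      rw [List.find?_cons_of_pos (by simpa only [beq_iff_eq] using hF)]
      rw [List.find?_cons_of_pos
        (p := fun x : String => PySem.Chars.startswith (html.toList.drop j) x.toList) hq]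
      rw [hF]
      simp
    · have hF : PySem.Str.findFrom html t (pos : Int) none ≠ (j : Int) := fun hh => hq (hifft.mpr hh)
      simp only [List.map_cons]
      rw [List.find?_cons_of_neg
        (p := fun x : String => PySem.Chars.startswith (html.toList.drop j) x.toList) hq]
      by_cases hF1 : PySem.Chars.findFrom html.toList t.toList (pos : Int) none = -1
      · rw [List.filter_cons_of_neg (by simp [hF1])]
        exact ihr
      · rw [List.filter_cons_of_pos (by simp [hF1])]
        rw [List.find?_cons_of_neg (by simpa only [beq_iff_eq] using hF)]
        exact ihr

theorem pv_findAnyA_some (html : String) (ts : List String) (pos : Nat) (j : Nat)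
    (hpos : pos ≤ html.toList.length)
    (h : (List.range' pos (html.toList.length + 1 - pos)).find?
          (fun j => ts.any (fun t => PySem.Chars.startswith (html.toList.drop j) t.toList)) = some j) :
    ∃ t₀, ts.find? (fun t => PySem.Chars.startswith (html.toList.drop j) t.toList) = some t₀ ∧
      findAnyA html ts (pos : Int) = ((j : Int), some t₀) := by
  obtain ⟨hpj, hsj, hjlt, hmin⟩ := pv_find?_range'_some h
  have hlbF : ∀ t ∈ ts, PySem.Str.findFrom html t (pos : Int) none ≠ -1 →
      (j : Int) ≤ PySem.Str.findFrom html t (pos : Int) none := by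
    intro t ht hne
    rw [PySem.Str.findFrom_eq] at hne ⊢
    obtain ⟨hge, hpre, hminF⟩ := PySem.Chars.findFrom_natCast_spec html.toList t.toList pos hpos hne
    by_contra hlt
    rw [Int.not_le] at hlt
    have hf0 : (0 : Int) ≤ PySem.Chars.findFrom html.toList t.toList ((pos : Int)) none :=
      le_trans (Int.natCast_nonneg pos) hge
    have h2 := hmin (PySem.Chars.findFrom html.toList t.toList ((pos : Int)) none).toNat
      (by omega) (by omega)
    simp only [List.any_eq_false] at h2
    have h3 := h2 t ht
    rw [(PySem.Chars.startswith_iff _ _).mpr hpre] at h3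
    simp at h3
  have heqF : ∀ t ∈ ts, (PySem.Chars.startswith (html.toList.drop j) t.toList = true ↔
      PySem.Str.findFrom html t (pos : Int) none = (j : Int)) := by
    intro t ht
    rw [PySem.Str.findFrom_eq, PySem.Chars.startswith_iff]
    constructor
    · intro hpre
      have hne : PySem.Chars.findFrom html.toList t.toList ((pos : Int)) none ≠ -1 := by
        intro hEq
        rw [PySem.Chars.findFrom_natCast_eq_neg_one_iff _ _ pos hpos] at hEq
        exact hEq (pv_prefix_drop_infix html.toList t.toList pos j hsj hpre)
      obtain ⟨hge, hpre', hminF⟩ :=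
        PySem.Chars.findFrom_natCast_spec html.toList t.toList pos hpos hne
      have hf0 : (0 : Int) ≤ PySem.Chars.findFrom html.toList t.toList ((pos : Int)) none :=
        le_trans (Int.natCast_nonneg pos) hge
      have hub : ¬ j < (PySem.Chars.findFrom html.toList t.toList ((pos : Int)) none).toNat := by
        intro hlt
        exact absurd hpre (hminF j hsj hlt)
      have hlb2 : ¬ (PySem.Chars.findFrom html.toList t.toList ((pos : Int)) none).toNat < j := by
        intro hlt
        have h2 := hmin (PySem.Chars.findFrom html.toList t.toList ((pos : Int)) none).toNat
          (by omega) hlt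
        simp only [List.any_eq_false] at h2
        have h3 := h2 t ht
        rw [(PySem.Chars.startswith_iff _ _).mpr hpre'] at h3
        simp at h3
      omega
    · intro hfj
      have hne : PySem.Chars.findFrom html.toList t.toList ((pos : Int)) none ≠ -1 := by
        rw [hfj]; omega
      obtain ⟨hge, hpre', hminF⟩ :=
        PySem.Chars.findFrom_natCast_spec html.toList t.toList pos hpos hne
      rw [hfj] at hpre'
      simpa using hpre'
  have hexfind : (ts.find? (fun t => PySem.Chars.startswith (html.toList.drop j) t.toList)).isSome := by
    rw [List.find?_isSome]
    simpa [List.any_eq_true] using hpj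
  obtain ⟨t₀, ht₀⟩ := Option.isSome_iff_exists.mp hexfind
  refine ⟨t₀, ht₀, ?_⟩
  have hcf := pv_cands_find html pos j ts heqF
  rw [ht₀] at hcf
  have hlb : ∀ x ∈ (ts.map (fun option =>
      (PySem.Str.findFrom html option (pos : Int) none, option))).filter (fun p => p.1 ≠ -1),
      (j : Int) ≤ x.1 := by
    intro x hx
    obtain ⟨hx1, hx2⟩ := List.mem_filter.mp hx
    obtain ⟨t, ht, rfl⟩ := List.mem_map.mp hx1
    exact hlbF t ht (by simpa using hx2)
  have hmq := pv_min?_eq_find? (fun it : Int × String => it.1) ((j : Int)) _ hlb (by rw [hcf]; rfl)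
  simp only [findAnyA]
  rw [hmq, hcf]
  rfl

-- shape of A's candidate-collecting loop (Prop-conditioned variant of PySem.List.foldl_append_if)
theorem pv_fold_shape (g : List String → Int × Option String) (egs : List (List String))
    (acc : List Int) :
    egs.foldl (fun acc group => if (g group).1 ≠ -1 then acc ++ [(g group).1] else acc) acc
      = acc ++ (egs.filter (fun group => decide ((g group).1 ≠ -1))).map (fun group => (g group).1) := by
  induction egs generalizing acc with
  | nil => simp
  | cons x rest ih =>
    by_cases hx : (g x).1 ≠ -1
    · simp only [List.foldl_cons, if_pos hx]
      rw [ih, List.filter_cons_of_pos (by simpa using hx)]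
      simp
    · simp only [List.foldl_cons, if_neg hx]
      rw [ih, List.filter_cons_of_neg (by simpa using hx)]

-- ===== VERDICT (by name: the statement is the Claim_ definition above) =====
theorem section_between_title_groups_py_spec : Claim_equal_section_between_title_groups_py := by
  intro html sts egs _hdom _hpre
  unfold Spec_section_between_title_groups_py
  simp only [section_between_title_groups_py, section_between_title_groups_py_alt]
  rw [List.range_eq_range']
  cases hscan : List.find? (fun i => sts.any fun t =>
      PySem.Chars.startswith (List.drop i html.toList) t.toList)
      (List.range' 0 (html.toList.length + 1)) with
  | none =>
    have hA := pv_findAnyA_none html sts 0 (Nat.zero_le _) (by rw [Nat.sub_zero]; exact hscan)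
    rw [Nat.cast_zero] at hA
    rw [hA]
    rfl
  | some i =>
    have hscan0 : List.find? (fun i => sts.any fun t =>
        PySem.Chars.startswith (List.drop i html.toList) t.toList)
        (List.range' 0 (html.toList.length + 1 - 0)) = some i := by
      rw [Nat.sub_zero]; exact hscan
    obtain ⟨t₀, ht₀, hA⟩ := pv_findAnyA_some html sts 0 i (Nat.zero_le _) hscan0
    rw [Nat.cast_zero] at hA
    obtain ⟨hpi, -, hilt, -⟩ := pv_find?_range'_some hscan0
    have hsw := List.find?_some ht₀
    have ht₀pre : t₀.toList <+: html.toList.drop i :=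
      (PySem.Chars.startswith_iff (html.toList.drop i) t₀.toList).mp hsw
    have hlen : i + t₀.toList.length ≤ html.toList.length := by
      have h1 := ht₀pre.length_le
      rw [List.length_drop] at h1
      omega
    rw [hA]
    simp only [ht₀, Option.getD_some]
    rw [if_neg (by omega : ¬((i : Int) = -1))]
    have hposarg : (i : Int) + PySem.Str.len t₀
        = (((i + t₀.toList.length : Nat) : Int)) := by
      rw [PySem.Str.len_eq]; push_cast; ring
    rw [hposarg]
    rw [pv_fold_shape (fun group => findAnyA html group ((i + t₀.toList.length : Nat) : Int)) egs []]
    simp only [List.nil_append]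
    -- abbreviations
    generalize hpos' : i + t₀.toList.length = pos at *
    have hpos : pos ≤ html.toList.length := hlen
    cases hscanE : List.find? (fun j => (egs.flatMap fun group => group).any fun t =>
        PySem.Chars.startswith (List.drop j html.toList) t.toList)
        (List.range' pos (html.toList.length + 1 - pos)) with
    | none =>
      have hflat := List.find?_eq_none.mp hscanE
      have hnilf : egs.filter (fun group =>
          decide ((findAnyA html group ((pos : Nat) : Int)).1 ≠ -1)) = [] := by
        rw [List.filter_eq_nil_iff]
        intro g hg
        have hgnone : List.find? (fun x => g.any fun t =>
            PySem.Chars.startswith (List.drop x html.toList) t.toList)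
            (List.range' pos (html.toList.length + 1 - pos)) = none := by
          rw [List.find?_eq_none]
          intro x hx hany
          apply hflat x hx
          rw [List.any_eq_true] at hany ⊢
          obtain ⟨t, ht, htt⟩ := hany
          exact ⟨t, List.mem_flatMap.mpr ⟨g, hg, ht⟩, htt⟩
        rw [pv_findAnyA_none html g pos hpos hgnone]
        simp
      rw [hnilf]
      simp only [List.map_nil]
      have : PySem.List.min? ([] : List Int) (fun x => x) = none := rfl
      rw [this, PySem.Str.len_eq]
      rfl
    | some j =>
      obtain ⟨hpj, hsj, hjlt, hmin⟩ := pv_find?_range'_some hscanE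
      have hlbC : ∀ g ∈ egs, (findAnyA html g ((pos : Nat) : Int)).1 ≠ -1 →
          (j : Int) ≤ (findAnyA html g ((pos : Nat) : Int)).1 := by
        intro g hg hne
        cases hsg : List.find? (fun x => g.any fun t =>
            PySem.Chars.startswith (List.drop x html.toList) t.toList)
            (List.range' pos (html.toList.length + 1 - pos)) with
        | none =>
          rw [pv_findAnyA_none html g pos hpos hsg] at hne
          simp at hne
        | some jg =>
          obtain ⟨t', ht', hfa⟩ := pv_findAnyA_some html g pos jg hpos hsg
          rw [hfa]
          obtain ⟨hpjg, hsjg, hjglt, hming⟩ := pv_find?_range'_some hsg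
          have hjle : ¬ jg < j := by
            intro hlt
            have h2 := hmin jg hsjg hlt
            rw [List.any_eq_false] at h2
            rw [List.any_eq_true] at hpjg
            obtain ⟨t, ht, htt⟩ := hpjg
            have h3 := h2 t (List.mem_flatMap.mpr ⟨g, hg, ht⟩)
            rw [htt] at h3
            simp at h3
          simp only []
          omega
      have hexC : ∃ g ∈ egs, (findAnyA html g ((pos : Nat) : Int)).1 = (j : Int) := by
        rw [List.any_eq_true] at hpj
        obtain ⟨t, htf, htt⟩ := hpj
        obtain ⟨g, hg, htg⟩ := List.mem_flatMap.mp htf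
        refine ⟨g, hg, ?_⟩
        cases hsg : List.find? (fun x => g.any fun t =>
            PySem.Chars.startswith (List.drop x html.toList) t.toList)
            (List.range' pos (html.toList.length + 1 - pos)) with
        | none =>
          have := List.find?_eq_none.mp hsg j (by rw [List.mem_range'_1]; omega)
          rw [List.any_eq_true] at this
          exact absurd ⟨t, htg, htt⟩ this
        | some jg =>
          obtain ⟨t', ht', hfa⟩ := pv_findAnyA_some html g pos jg hpos hsg
          obtain ⟨hpjg, hsjg, hjglt, hming⟩ := pv_find?_range'_some hsg
          have h1 : ¬ j < jg := by
            intro hlt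
            have h2 := hming j hsj hlt
            rw [List.any_eq_false] at h2
            have h3 := h2 t htg
            rw [htt] at h3
            simp at h3
          have h2 : ¬ jg < j := by
            intro hlt
            have h2 := hmin jg hsjg hlt
            rw [List.any_eq_false] at h2
            rw [List.any_eq_true] at hpjg
            obtain ⟨t2, ht2, htt2⟩ := hpjg
            have h3 := h2 t2 (List.mem_flatMap.mpr ⟨g, hg, ht2⟩)
            rw [htt2] at h3
            simp at h3
          have : jg = j := by omega
          rw [hfa, this]
      obtain ⟨g₀, hg₀, hg₀j⟩ := hexC
      have hmemC : ((j : Int)) ∈ (egs.filter (fun group =>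
          decide ((findAnyA html group ((pos : Nat) : Int)).1 ≠ -1))).map
          (fun group => (findAnyA html group ((pos : Nat) : Int)).1) := by
        refine List.mem_map.mpr ⟨g₀, List.mem_filter.mpr ⟨hg₀, by rw [hg₀j]; simp⟩, hg₀j⟩
      have hlb : ∀ x ∈ (egs.filter (fun group =>
          decide ((findAnyA html group ((pos : Nat) : Int)).1 ≠ -1))).map
          (fun group => (findAnyA html group ((pos : Nat) : Int)).1), (j : Int) ≤ x := by
        intro x hx
        obtain ⟨g, hgf, rfl⟩ := List.mem_map.mp hx
        obtain ⟨hg, hgd⟩ := List.mem_filter.mp hgf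
        exact hlbC g hg (by simpa using hgd)
      have hsome : (List.find? (fun x => (fun x : Int => x) x == (j : Int))
          ((egs.filter (fun group =>
            decide ((findAnyA html group ((pos : Nat) : Int)).1 ≠ -1))).map
            (fun group => (findAnyA html group ((pos : Nat) : Int)).1))).isSome :=
        List.find?_isSome.mpr ⟨(j : Int), hmemC, by exact beq_self_eq_true _⟩
      have hmq := pv_min?_eq_find? (fun x : Int => x) ((j : Int)) _ hlb hsome
      obtain ⟨v, hv⟩ := Option.isSome_iff_exists.mp hsome
      have hvt := List.find?_some hv
      have hvj : v = (j : Int) := by simpa using hvt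
      rw [hv, hvj] at hmq
      rw [hmq]
      rfl
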